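-- pv_equiv track=rewrite | github.com/rchopinw/coding_exercise | quora.py | prefix_string_pairs
-- ===== SOURCE A (Python) =====
-- def prefix_string_pairs(s):
--     tree = {}
--     pairs = 0
--     s = sorted(s, key=lambda x: -len(x))
--
--     def insert_tree(tree, item):
--         cur = tree
--         for i in range(len(item)):
--             if item[i] in cur:
--                 cur[item[i]][1] += 1
--             else:
--                 cur[item[i]] = [{}, 1]
--             cur = cur[item[i]][0]
--
--     def is_in_tree(tree, item):
--         cur = tree
--         count = 0
--         for i in range(len(item)):
--             if item[i] in cur:
--                 count = cur[item[i]][1]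
--                 cur = cur[item[i]][0]
--             else:
--                 return 0
--         return count
--
--     for i in s:
--         cur = is_in_tree(tree, i)
--         if cur == 0:
--             insert_tree(tree, i)
--         else:
--             pairs += cur
--             insert_tree(tree, i)
--     return pairs
-- ===== SOURCE B (Python) =====
-- def prefix_string_pairs(s):
--     pairs = 0
--     seen = []
--     for b0 in s:
--         for a0 in seen:
--             a, b = (a0, b0) if len(a0) <= len(b0) else (b0, a0)
--             if a and b[:len(a)] == a:
--                 pairs += 1
--         seen.append(b0)
--     return pairs
-- ===== Notes on version B (the rewrite author's own statement) =====
-- stated objective: simpler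
-- what changed: Replaces the length-sort plus incremental counted trie with a single pass that compares each new string directly against every previously seen string by slice comparison (the shorter, nonempty one must be a prefix of the longer), with no sorting and no trie; this is slower on large inputs (quadratic) but much shorter and plainer.
import Mathlib
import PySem

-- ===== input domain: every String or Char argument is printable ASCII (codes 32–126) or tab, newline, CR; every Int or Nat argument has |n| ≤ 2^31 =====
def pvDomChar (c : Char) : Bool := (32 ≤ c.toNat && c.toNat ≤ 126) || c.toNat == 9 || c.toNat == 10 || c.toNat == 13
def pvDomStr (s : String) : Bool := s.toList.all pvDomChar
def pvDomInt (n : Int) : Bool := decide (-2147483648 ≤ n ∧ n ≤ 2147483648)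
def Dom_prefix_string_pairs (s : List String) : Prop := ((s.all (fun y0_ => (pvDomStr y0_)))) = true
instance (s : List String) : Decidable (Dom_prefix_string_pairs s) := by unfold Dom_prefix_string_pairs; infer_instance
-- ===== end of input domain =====

-- B drops the sort and the counted trie: one pass comparing each string with all earlier ones by slice comparison (alternative decomposition, not claimed faster).

-- ===== PORT A =====
-- the Python trie: a dict mapping char -> [subtree, count]; a node IS its dict, so an
-- assoc-structure inductive (entry = key, child trie, count, rest of the dict) represents it
inductive PvTrie where
  | nil : PvTrie
  | cons : Char → PvTrie → Int → PvTrie → PvTrie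

-- 'item[i] in cur' / 'cur[item[i]]' : first (unique) matching key
def pvTmFind : PvTrie → Char → Option (PvTrie × Int)
  | .nil, _ => none
  | .cons d sub cnt rest, c => if c = d then some (sub, cnt) else pvTmFind rest c

-- 'cur[item[i]] = …' : overwrite in place, else append (dict semantics)
def pvTmSet : PvTrie → Char → PvTrie → Int → PvTrie
  | .nil, c, t, k => .cons c t k .nil
  | .cons d sub cnt rest, c, t, k =>
      if c = d then .cons d t k rest else .cons d sub cnt (pvTmSet rest c t k)

-- insert_tree: walk item's chars, increment counts, create empty children
def pvInsertTree : PvTrie → List Char → PvTrie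
  | t, [] => t
  | m, c :: rest =>
      match pvTmFind m c with
      | some (sub, cnt) => pvTmSet m c (pvInsertTree sub rest) (cnt + 1)
      | none => pvTmSet m c (pvInsertTree .nil rest) 1

-- is_in_tree: walk item's chars carrying the last count seen
def pvIsInTree : PvTrie → Int → List Char → Int
  | _, count, [] => count
  | m, _, c :: rest =>
      match pvTmFind m c with
      | some (sub, cnt) => pvIsInTree sub cnt rest
      | none => 0

def prefix_string_pairs (s : List String) : Int :=
  let s' := PySem.List.sorted s (fun x => -(PySem.Str.len x)) false
  (s'.foldl (fun (st : PvTrie × Int) i =>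
      let cur := pvIsInTree st.1 0 i.toList
      if cur == 0 then (pvInsertTree st.1 i.toList, st.2)
      else (pvInsertTree st.1 i.toList, st.2 + cur))
    (PvTrie.nil, 0)).2

-- ===== PORT B =====
-- 'a, b = (a0, b0) if len(a0) <= len(b0) else (b0, a0); a and b[:len(a)] == a' (b[:len(a)] = take, the bound is nonnegative)
def pvCond (a0 b0 : String) : Bool :=
  let a := if a0.toList.length ≤ b0.toList.length then a0 else b0
  let b := if a0.toList.length ≤ b0.toList.length then b0 else a0
  decide (a.toList ≠ []) && (b.toList.take a.toList.length == a.toList)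

def prefix_string_pairs_alt (s : List String) : Int :=
  (s.foldl (fun (st : List String × Int) b0 =>
      (st.1 ++ [b0], st.1.foldl (fun p a0 => if pvCond a0 b0 then p + 1 else p) st.2))
    ([], 0)).2

-- ===== PRECONDITION & SPEC =====
def Spec_prefix_string_pairs (s : List String) (out : Int) : Prop := out = prefix_string_pairs_alt s
instance (s : List String) (out : Int) : Decidable (Spec_prefix_string_pairs s out) := by unfold Spec_prefix_string_pairs; infer_instance

-- ===== CLAIM (what is proved, stated in full; the proofs are below) =====
def Claim_equal_prefix_string_pairs : Prop := ∀ (s : List String), Dom_prefix_string_pairs s → Spec_prefix_string_pairs s (prefix_string_pairs s)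

-- ===== LEMMAS AND PROOFS =====

-- A's per-pair indicator: x inserted earlier, y queried later
def pvIndA (x y : String) : Bool := decide (y.toList ≠ []) && y.toList.isPrefixOf x.toList

-- sum over ordered pairs (earlier, later) of an indicator
def pvCnt (f : String → String → Bool) : List String → Int
  | [] => 0
  | x :: xs => (xs.countP (f x) : Int) + pvCnt f xs

def pvCross (f : String → String → Bool) (done l : List String) : Int :=
  (l.map (fun y => ((done.countP (fun x => f x y) : Nat) : Int))).sum

theorem pvIsInTree_acc (item : List Char) (t : PvTrie) (a b : Int) (h : item ≠ []) :
    pvIsInTree t a item = pvIsInTree t b item := by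
  cases item with
  | nil => exact absurd rfl h
  | cons c rest => simp only [pvIsInTree]

theorem pvTmFind_set (m : PvTrie) (c d : Char) (v : PvTrie) (k : Int) :
    pvTmFind (pvTmSet m d v k) c = if c = d then some (v, k) else pvTmFind m c := by
  induction m with
  | nil =>
      simp only [pvTmSet, pvTmFind]
  | cons e sub cnt rest ih1 ih2 =>
      simp only [pvTmSet]
      by_cases hde : d = e
      · subst hde
        rw [if_pos rfl]
        by_cases h : c = d <;> simp [pvTmFind, h]
      · rw [if_neg hde]
        simp only [pvTmFind, ih2]
        by_cases hce : c = e
        · subst hce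
          have hcd : ¬ c = d := fun h => hde h.symm
          simp [hcd]
        · simp [hce]

theorem pvLookup_nil (item : List Char) : pvIsInTree PvTrie.nil 0 item = 0 := by
  cases item <;> simp [pvIsInTree, pvTmFind]

theorem pvLookup_insert (item x : List Char) (t : PvTrie) :
    pvIsInTree (pvInsertTree t x) 0 item =
      pvIsInTree t 0 item + (if item ≠ [] ∧ item.IsPrefix x then 1 else 0) := by
  induction item generalizing x t with
  | nil => simp [pvIsInTree]
  | cons c rest ih =>
    cases x with
    | nil => simp [pvInsertTree]
    | cons d xs =>
      simp only [pvInsertTree]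
      cases hf : pvTmFind t d with
      | some p =>
        obtain ⟨sub, cnt⟩ := p
        by_cases hcd : c = d
        · subst hcd
          have hL : pvIsInTree (pvTmSet t c (pvInsertTree sub xs) (cnt + 1)) 0 (c :: rest)
              = pvIsInTree (pvInsertTree sub xs) (cnt + 1) rest := by
            simp [pvIsInTree, pvTmFind_set]
          have hR : pvIsInTree t 0 (c :: rest) = pvIsInTree sub cnt rest := by
            simp [pvIsInTree, hf]
          rw [hL, hR]
          cases rest with
          | nil => simp [pvIsInTree, List.cons_prefix_cons]
          | cons r rs =>
            rw [pvIsInTree_acc (r :: rs) _ (cnt + 1) 0 (by simp),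
                pvIsInTree_acc (r :: rs) sub cnt 0 (by simp), ih]
            simp [List.cons_prefix_cons]
        · have hL : pvIsInTree (pvTmSet t d (pvInsertTree sub xs) (cnt + 1)) 0 (c :: rest)
              = pvIsInTree t 0 (c :: rest) := by
            simp only [pvIsInTree, pvTmFind_set, if_neg hcd]
          rw [hL]
          simp [List.cons_prefix_cons, hcd]
      | none =>
        by_cases hcd : c = d
        · subst hcd
          have hL : pvIsInTree (pvTmSet t c (pvInsertTree .nil xs) 1) 0 (c :: rest)
              = pvIsInTree (pvInsertTree .nil xs) 1 rest := by
            simp [pvIsInTree, pvTmFind_set]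
          have hR : pvIsInTree t 0 (c :: rest) = 0 := by
            simp [pvIsInTree, hf]
          rw [hL, hR]
          cases rest with
          | nil => simp [pvIsInTree, List.cons_prefix_cons]
          | cons r rs =>
            rw [pvIsInTree_acc (r :: rs) _ 1 0 (by simp), ih, pvLookup_nil]
            simp [List.cons_prefix_cons]
        · have hL : pvIsInTree (pvTmSet t d (pvInsertTree .nil xs) 1) 0 (c :: rest)
              = pvIsInTree t 0 (c :: rest) := by
            simp only [pvIsInTree, pvTmFind_set, if_neg hcd]
          rw [hL]
          simp [List.cons_prefix_cons, hcd]

theorem pvLookup_build (ts : List String) (t : PvTrie) (item : List Char) :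
    pvIsInTree (ts.foldl (fun a i => pvInsertTree a i.toList) t) 0 item =
      pvIsInTree t 0 item + (ts.countP (fun x => decide (item ≠ []) && item.isPrefixOf x.toList) : Int) := by
  induction ts generalizing t with
  | nil => simp
  | cons y ys ih =>
    simp only [List.foldl_cons, ih, List.countP_cons, pvLookup_insert]
    by_cases h1 : item = []
    · subst h1; simp
    · by_cases h2 : item.IsPrefix y.toList
      · simp [h1, h2, List.isPrefixOf_iff_prefix]; ring
      · simp [h1, h2, List.isPrefixOf_iff_prefix]

theorem pvCross_append (f : String → String → Bool) (done : List String) (y : String) (l : List String) :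
    pvCross f (done ++ [y]) l = pvCross f done l + (l.countP (fun z => f y z) : Int) := by
  induction l with
  | nil => simp [pvCross]
  | cons z rest ih =>
    simp only [pvCross, List.map_cons, List.sum_cons, List.countP_cons] at *
    rw [List.countP_append]
    rw [ih]
    simp only [List.countP_cons, List.countP_nil]
    by_cases h : f y z <;> simp [h] <;> ring

theorem pvAloop (l done : List String) (pairs : Int) :
    ((l.foldl (fun (st : PvTrie × Int) i =>
        let cur := pvIsInTree st.1 0 i.toList
        if cur == 0 then (pvInsertTree st.1 i.toList, st.2)
        else (pvInsertTree st.1 i.toList, st.2 + cur))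
      (done.foldl (fun a i => pvInsertTree a i.toList) (PvTrie.nil), pairs)).2)
    = pairs + pvCross pvIndA done l + pvCnt pvIndA l := by
  induction l generalizing done pairs with
  | nil => simp [pvCross, pvCnt]
  | cons y ys ih =>
    have hb : pvInsertTree (done.foldl (fun a i => pvInsertTree a i.toList) PvTrie.nil) y.toList
        = (done ++ [y]).foldl (fun a i => pvInsertTree a i.toList) PvTrie.nil := by
      simp [List.foldl_append]
    have hcur : pvIsInTree (done.foldl (fun a i => pvInsertTree a i.toList) PvTrie.nil) 0 y.toList
        = (done.countP (fun x => pvIndA x y) : Int) := by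
      rw [pvLookup_build, pvLookup_nil, zero_add]
      rfl
    simp only [List.foldl_cons]
    have hstep : (let cur := pvIsInTree (done.foldl (fun a i => pvInsertTree a i.toList) PvTrie.nil) 0 y.toList
        if cur == 0 then (pvInsertTree (done.foldl (fun a i => pvInsertTree a i.toList) PvTrie.nil) y.toList, pairs)
        else (pvInsertTree (done.foldl (fun a i => pvInsertTree a i.toList) PvTrie.nil) y.toList, pairs + cur))
        = ((done ++ [y]).foldl (fun a i => pvInsertTree a i.toList) PvTrie.nil,
           pairs + (done.countP (fun x => pvIndA x y) : Int)) := by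
      simp only []
      by_cases h : pvIsInTree (done.foldl (fun a i => pvInsertTree a i.toList) PvTrie.nil) 0 y.toList = 0
      · rw [if_pos (by simp [h]), hb, ← hcur, h, add_zero]
      · rw [if_neg (by simp [h]), hb, hcur]
    rw [hstep, ih, pvCross_append]
    simp only [pvCross, List.map_cons, List.sum_cons, pvCnt]
    ring

theorem pvFoldCount (g : String → Bool) (l : List String) (p : Int) :
    l.foldl (fun p a0 => if g a0 then p + 1 else p) p = p + (l.countP g : Int) := by
  induction l generalizing p with
  | nil => simp
  | cons z rest ih =>
    simp only [List.foldl_cons, List.countP_cons, ih]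
    by_cases h : g z
    · simp [h]
      ring
    · simp [h]

theorem pvBloop (l seen : List String) (pairs : Int) :
    ((l.foldl (fun (st : List String × Int) b0 =>
        (st.1 ++ [b0], st.1.foldl (fun p a0 => if pvCond a0 b0 then p + 1 else p) st.2))
      (seen, pairs)).2)
    = pairs + pvCross pvCond seen l + pvCnt pvCond l := by
  induction l generalizing seen pairs with
  | nil => simp [pvCross, pvCnt]
  | cons y ys ih =>
    simp only [List.foldl_cons]
    rw [pvFoldCount, ih, pvCross_append]
    simp only [pvCross, List.map_cons, List.sum_cons, pvCnt]
    ring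

theorem pvTake_eq_beq (x y : String) (h : x.toList.length = y.toList.length) :
    (decide (x.toList ≠ []) && (y.toList.take x.toList.length == x.toList))
      = (decide (y.toList ≠ []) && (x.toList.take y.toList.length == y.toList)) := by
  rw [List.take_of_length_le (le_of_eq h.symm), List.take_of_length_le (le_of_eq h)]
  by_cases he : y.toList = x.toList
  · simp [he]
  · have hf1 : (y.toList == x.toList) = false := by simp [he]
    have hf2 : (x.toList == y.toList) = false := by
      simp only [beq_eq_false_iff_ne, ne_eq]
      exact fun hh => he (Eq.symm hh)
    rw [hf1, hf2]
    simp

theorem pvCond_symm (x y : String) : pvCond x y = pvCond y x := by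
  by_cases h1 : x.toList.length ≤ y.toList.length
  · by_cases h2 : y.toList.length ≤ x.toList.length
    · simp only [pvCond, if_pos h1, if_pos h2]
      exact pvTake_eq_beq x y (le_antisymm h1 h2)
    · simp only [pvCond, if_pos h1, if_neg h2]
  · by_cases h2 : y.toList.length ≤ x.toList.length
    · simp only [pvCond, if_neg h1, if_pos h2]
    · omega

theorem pvCond_eq_indA (x y : String) (h : y.toList.length ≤ x.toList.length) :
    pvCond x y = pvIndA x y := by
  unfold pvCond pvIndA
  by_cases hxy : x.toList.length ≤ y.toList.length
  · have heq : x.toList.length = y.toList.length := le_antisymm hxy h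
    simp only [if_pos hxy]
    rw [List.take_of_length_le (le_of_eq heq.symm)]
    have hpre : y.toList.isPrefixOf x.toList = (y.toList == x.toList) := by
      by_cases he : y.toList = x.toList
      · simp [he, List.isPrefixOf_iff_prefix]
      · have hb1 : y.toList.isPrefixOf x.toList = false := by
          rw [← Bool.not_eq_true]
          simp only [List.isPrefixOf_iff_prefix]
          intro hp
          exact he (List.IsPrefix.eq_of_length hp (by omega))
        have hb2 : (y.toList == x.toList) = false := by simp [he]
        rw [hb1, hb2]
    rw [hpre]
    by_cases he : y.toList = x.toList
    · simp [he]
    · have hf : (y.toList == x.toList) = false := by simp [he]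
      rw [hf]
      simp
  · simp only [if_neg hxy]
    by_cases hp : y.toList.IsPrefix x.toList
    · have ht : x.toList.take y.toList.length = y.toList :=
        (List.prefix_iff_eq_take.mp hp).symm
      have htb : (List.take y.toList.length x.toList == y.toList) = true := by rw [ht]; simp
      have hif : y.toList.isPrefixOf x.toList = true := by
        simp [List.isPrefixOf_iff_prefix, hp]
      rw [htb, hif]
    · have ht : x.toList.take y.toList.length ≠ y.toList :=
        fun hh => hp (List.prefix_iff_eq_take.mpr hh.symm)
      have htb : (List.take y.toList.length x.toList == y.toList) = false := by
        simp only [beq_eq_false_iff_ne, ne_eq]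
        exact ht
      have hif : y.toList.isPrefixOf x.toList = false := by
        rw [← Bool.not_eq_true]
        simp [List.isPrefixOf_iff_prefix, hp]
      rw [htb, hif]

theorem pvCnt_congr (f g : String → String → Bool) (R : String → String → Prop) (l : List String)
    (hp : l.Pairwise R) (hfg : ∀ x y, R x y → f x y = g x y) :
    pvCnt f l = pvCnt g l := by
  induction hp with
  | nil => rfl
  | cons hx _ ih =>
    simp only [pvCnt, ih]
    congr 2
    exact List.countP_congr (fun y hy => by rw [hfg _ _ (hx y hy)])

theorem pvCnt_perm (f : String → String → Bool) (hsym : ∀ x y, f x y = f y x)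
    {l₁ l₂ : List String} (hp : l₁.Perm l₂) : pvCnt f l₁ = pvCnt f l₂ := by
  induction hp with
  | nil => rfl
  | cons x h ih =>
    simp only [pvCnt, ih]
    congr 1
    exact_mod_cast List.Perm.countP_eq (f x) h
  | swap x y l =>
    simp only [pvCnt, List.countP_cons]
    rw [hsym y x]
    by_cases h : f x y <;> simp [h] <;> ring
  | trans _ _ ih₁ ih₂ => exact ih₁.trans ih₂

-- ===== VERDICT (by name: the statement is the Claim_ definition above) =====
theorem pvCross_nil (f : String → String → Bool) (l : List String) : pvCross f [] l = 0 := by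
  induction l with
  | nil => rfl
  | cons z r ih =>
    simp only [pvCross, List.map_cons, List.sum_cons, List.countP_nil, Nat.cast_zero,
      zero_add] at ih ⊢
    exact ih

theorem prefix_string_pairs_spec : Claim_equal_prefix_string_pairs := by
  intro s _
  unfold Spec_prefix_string_pairs
  have hA : prefix_string_pairs s
      = pvCnt pvIndA (PySem.List.sorted s (fun x => -(PySem.Str.len x)) false) := by
    have h := pvAloop (PySem.List.sorted s (fun x => -(PySem.Str.len x)) false) [] 0
    rw [pvCross_nil, zero_add, zero_add] at h
    exact h
  have hB : prefix_string_pairs_alt s = pvCnt pvCond s := by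
    have h := pvBloop s [] 0
    rw [pvCross_nil, zero_add, zero_add] at h
    exact h
  rw [hA, hB]
  have hpw : (PySem.List.sorted s (fun x => -(PySem.Str.len x)) false).Pairwise
      (fun a b => b.toList.length ≤ a.toList.length) := by
    have hp := PySem.List.sorted_pairwise (xs := s) (key := fun x => -(PySem.Str.len x))
    refine hp.imp ?_
    intro a b hab
    simp only [PySem.Str.len_eq] at hab
    show b.toList.length ≤ a.toList.length
    omega
  have h1 : pvCnt pvIndA (PySem.List.sorted s (fun x => -(PySem.Str.len x)) false)
      = pvCnt pvCond (PySem.List.sorted s (fun x => -(PySem.Str.len x)) false) :=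
    pvCnt_congr pvIndA pvCond _ _ hpw (fun x y hR => (pvCond_eq_indA x y hR).symm)
  have h2 : pvCnt pvCond (PySem.List.sorted s (fun x => -(PySem.Str.len x)) false)
      = pvCnt pvCond s :=
    pvCnt_perm pvCond pvCond_symm (PySem.List.sorted_perm s (fun x => -(PySem.Str.len x)) false)
  rw [h1, h2]
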